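-- pv_equiv track=rewrite | github.com/cjswo4034/Algorithm_python | boj/etc/키워드검색_3891_Fail.py | check
-- ===== SOURCE A (Python) =====
-- def check(depth, visit, arr, sub_str):
--     if depth == len(arr): return sub_str.strip() == ''
--
--     for i in range(len(arr)):
--         if visit[i] or arr[i] not in sub_str: continue
--         visit[i] = True
--         next_str = sub_str.replace(arr[i], ' ', 1)
--         if check(depth + 1, visit, arr, next_str): return True
--         visit[i] = False
--     return False
-- ===== SOURCE B (Python) =====
-- def check(depth, visit, arr, sub_str):
--     if depth == len(arr):
--         return sub_str.strip() == ''
--     remaining = [arr[i] for i in range(len(arr)) if not visit[i]]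
--     return _search(len(arr) - depth, remaining, sub_str)
--
--
-- def _search(need, remaining, s):
--     if need == 0:
--         return s.strip() == ''
--     for j in range(len(remaining)):
--         w = remaining[j]
--         if w in s and _search(need - 1, remaining[:j] + remaining[j + 1:], s.replace(w, ' ', 1)):
--             return True
--     return False
-- ===== Notes on version B (the rewrite author's own statement) =====
-- stated objective: simpler
-- what changed: A's index-based backtracking that mutates a visit[] array in place is replaced by a pure recursion on the list of still-unused keywords (built once) with a countdown of remaining picks; no shared mutable state, no index bookkeeping.
-- outside the precondition, e.g. on check(1, [False], ['a', 'x'], 'a'): A returns True, B raises IndexError; on check(0, [], ['a'], 'a'): A raises IndexError, B raises IndexError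
import Mathlib
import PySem

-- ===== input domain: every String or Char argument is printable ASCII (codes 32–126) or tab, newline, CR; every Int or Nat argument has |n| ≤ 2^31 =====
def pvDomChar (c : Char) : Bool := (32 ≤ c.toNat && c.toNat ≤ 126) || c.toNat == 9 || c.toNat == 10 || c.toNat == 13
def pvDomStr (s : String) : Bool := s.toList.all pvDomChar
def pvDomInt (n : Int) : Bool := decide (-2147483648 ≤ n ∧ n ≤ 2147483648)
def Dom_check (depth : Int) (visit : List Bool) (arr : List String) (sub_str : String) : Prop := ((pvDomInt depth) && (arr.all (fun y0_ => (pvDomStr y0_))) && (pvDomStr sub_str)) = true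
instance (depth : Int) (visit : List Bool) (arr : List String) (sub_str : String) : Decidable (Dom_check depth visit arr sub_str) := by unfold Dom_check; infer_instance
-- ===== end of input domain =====

-- B replaces A's visit[]-mutating backtracking over indices by a pure recursion on the list of
-- still-unused keywords with a countdown of picks (objective: simpler).  A mutates its `visit`
-- argument in place (left partially set on success); B does not mutate anything — the equivalence
-- proved here is about the RETURN value only.

-- shared built-in: s.replace(old, ' ', 1) — hand port of str.replace with count=1 (PySem.Str.replace
-- has no count argument); exact: first occurrence (leftmost, via find) replaced, old = '' prepends ' '.
def pvReplace1 (s : String) (old : String) : String :=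
  let cs := s.toList
  let i := PySem.Chars.find cs old.toList
  if i = -1 then s
  else String.ofList (cs.take i.toNat ++ [' '] ++ cs.drop (i.toNat + old.toList.length))

-- used by port A's termination proof (cited in decreasing_by)
theorem pvCountSetLt (xs : List Bool) (i : Nat) (h : xs[i]? = some false) :
    (xs.set i true).count false < xs.count false := by
  induction xs generalizing i with
  | nil => simp at h
  | cons a t ih =>
    cases i with
    | zero => simp_all
    | succ n =>
      simp only [List.getElem?_cons_succ] at h
      simpa [List.count_cons] using ih n h

-- used by port A's termination proof: a default-true read that comes back false was in range
theorem pvGetDFalse (xs : List Bool) (i : Nat)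
    (h : PySem.List.pyGetD xs (i : Int) true = false) : xs[i]? = some false := by
  rw [PySem.List.pyGetD_natCast] at h
  cases hx : xs[i]? with
  | none => rw [List.getD_eq_getElem?_getD, hx] at h; simp at h
  | some b => rw [List.getD_eq_getElem?_getD, hx] at h; simp_all

-- ===== PORT A =====
mutual
def check (depth : Int) (visit : List Bool) (arr : List String) (sub_str : String) : Bool :=
  if depth = (arr.length : Int) then PySem.Str.strip sub_str == "" else
    checkLoop depth visit arr sub_str 0
  termination_by (visit.count false, 1, 0)
  decreasing_by
    exact Prod.Lex.right _ (Prod.Lex.left _ _ (by omega))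

-- the 'for i in range(len(arr))' loop of A, with early return.  visit[i] is ported as a read with
-- default true: for i ≥ len(visit) Python raises IndexError — excluded by Pre_check, so the port's
-- skip there is unconstrained; for i < len(visit) the read is exact.
def checkLoop (depth : Int) (visit : List Bool) (arr : List String) (sub_str : String) (i : Nat) : Bool :=
  if h : i < arr.length then
    if hcond : PySem.List.pyGetD visit (i : Int) true || !(PySem.Str.isIn arr[i] sub_str) then
      checkLoop depth visit arr sub_str (i+1)
    else
      if check (depth + 1) (visit.set i true) arr (pvReplace1 sub_str arr[i]) then true
      else checkLoop depth visit arr sub_str (i+1)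
  else false
  termination_by (visit.count false, 0, arr.length - i)
  decreasing_by
    · exact Prod.Lex.right _ (Prod.Lex.right _ (by omega))
    · exact Prod.Lex.left _ _ (pvCountSetLt visit i (pvGetDFalse visit i (by
        simp only [Bool.or_eq_true, Bool.not_eq_true'] at hcond
        cases hx : PySem.List.pyGetD visit (i : Int) true
        · rfl
        · exact absurd (Or.inl hx) hcond)))
    · exact Prod.Lex.right _ (Prod.Lex.right _ (by omega))
end

-- ===== PORT B =====
-- [arr[i] for i in range(len(arr)) if not visit[i]]  (faithful where len(visit) ≥ len(arr), i.e. on Pre_check)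
def remainingOf : List Bool → List String → List String
  | _, [] => []
  | [], _ :: _ => []  -- visit[i] IndexError in Python (excluded by Pre_check)
  | v :: vs, a :: as => if v then remainingOf vs as else a :: remainingOf vs as

mutual
def searchB (need : Int) (remaining : List String) (s : String) : Bool :=
  if need = 0 then PySem.Str.strip s == "" else searchLoop need remaining s 0
  termination_by (remaining.length, 1, 0)
  decreasing_by
    exact Prod.Lex.right _ (Prod.Lex.left _ _ (by omega))

-- the 'for j in range(len(remaining))' loop of _search; remaining[:j] + remaining[j+1:] ported as
-- take j ++ drop (j+1), exact for 0 ≤ j < len(remaining)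
def searchLoop (need : Int) (remaining : List String) (s : String) (j : Nat) : Bool :=
  if h : j < remaining.length then
    if PySem.Str.isIn remaining[j] s &&
        searchB (need - 1) (remaining.take j ++ remaining.drop (j+1)) (pvReplace1 s remaining[j]) then
      true
    else searchLoop need remaining s (j+1)
  else false
  termination_by (remaining.length, 0, remaining.length - j)
  decreasing_by
    · exact Prod.Lex.left _ _ (by simp; omega)
    · exact Prod.Lex.right _ (Prod.Lex.right _ (by omega))
end

def check_alt (depth : Int) (visit : List Bool) (arr : List String) (sub_str : String) : Bool :=
  if depth = (arr.length : Int) then PySem.Str.strip sub_str == "" else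
    searchB ((arr.length : Int) - depth) (remainingOf visit arr) sub_str

-- ===== PRECONDITION & SPEC =====
-- Pre_ excludes inputs with visit shorter than arr (unless depth == len(arr), where neither program
-- touches visit): there A raises IndexError except when an accidental early success returns first,
-- and B's comprehension raises IndexError.
def Pre_check (depth : Int) (visit : List Bool) (arr : List String) (sub_str : String) : Prop :=
  depth = (arr.length : Int) ∨ arr.length ≤ visit.length
instance (depth : Int) (visit : List Bool) (arr : List String) (sub_str : String) : Decidable (Pre_check depth visit arr sub_str) := by unfold Pre_check; infer_instance

def pvWitness_check : Int × List Bool × List String × String := (0, [false], ["a"], "a")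

def Spec_check (depth : Int) (visit : List Bool) (arr : List String) (sub_str : String) (out : Bool) : Prop := out = check_alt depth visit arr sub_str
instance (depth : Int) (visit : List Bool) (arr : List String) (sub_str : String) (out : Bool) : Decidable (Spec_check depth visit arr sub_str out) := by unfold Spec_check; infer_instance

-- ===== CLAIM (what is proved, stated in full; the proofs are below) =====
def Claim_equal_check : Prop := ∀ (depth : Int) (visit : List Bool) (arr : List String) (sub_str : String), Dom_check depth visit arr sub_str → Pre_check depth visit arr sub_str → Spec_check depth visit arr sub_str (check depth visit arr sub_str)

-- ===== LEMMAS AND PROOFS =====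

-- remainingOf is the unvisited subsequence: its length is the number of unvisited slots
theorem remLen (arr : List String) : ∀ (visit : List Bool), arr.length ≤ visit.length →
    (remainingOf visit arr).length = (visit.take arr.length).count false := by
  induction arr with
  | nil => intro visit _; simp [remainingOf]
  | cons a as ih =>
    intro visit hlen
    cases visit with
    | nil => simp at hlen
    | cons v vs =>
      simp only [List.length_cons] at hlen
      cases v <;> simp [remainingOf, ih vs (by omega)]

-- at an unvisited index i, the matching slot of remainingOf holds arr[i]
theorem remGet (i : Nat) : ∀ (visit : List Bool) (arr : List String),
    i < arr.length → arr.length ≤ visit.length → visit[i]? = some false →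
    (remainingOf visit arr)[(visit.take i).count false]? = some arr[i]! := by
  induction i with
  | zero =>
    intro visit arr hi hlen hv
    cases arr with
    | nil => simp at hi
    | cons a as =>
      cases visit with
      | nil => simp at hv
      | cons v vs =>
        simp only [List.getElem?_cons_zero, Option.some.injEq] at hv
        subst hv
        simp [remainingOf]
  | succ n ih =>
    intro visit arr hi hlen hv
    cases arr with
    | nil => simp at hi
    | cons a as =>
      cases visit with
      | nil => simp at hv
      | cons v vs =>
        simp only [List.getElem?_cons_succ] at hv
        simp only [List.length_cons] at hi hlen
        have := ih vs as (by omega) (by omega) hv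
        cases v <;> simp [remainingOf, this]

-- marking index i visited removes exactly slot j = count of earlier unvisited slots
theorem remSet (i : Nat) : ∀ (visit : List Bool) (arr : List String),
    i < arr.length → arr.length ≤ visit.length → visit[i]? = some false →
    remainingOf (visit.set i true) arr =
      (remainingOf visit arr).take ((visit.take i).count false) ++
      (remainingOf visit arr).drop ((visit.take i).count false + 1) := by
  induction i with
  | zero =>
    intro visit arr hi hlen hv
    cases arr with
    | nil => simp at hi
    | cons a as =>
      cases visit with
      | nil => simp at hv
      | cons v vs =>
        simp only [List.getElem?_cons_zero, Option.some.injEq] at hv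
        subst hv
        simp [remainingOf]
  | succ n ih =>
    intro visit arr hi hlen hv
    cases arr with
    | nil => simp at hi
    | cons a as =>
      cases visit with
      | nil => simp at hv
      | cons v vs =>
        simp only [List.getElem?_cons_succ] at hv
        simp only [List.length_cons] at hi hlen
        have := ih vs as (by omega) (by omega) hv
        cases v <;> simp [remainingOf, List.set, this]

-- count over take steps by one slot
theorem countTakeSucc (visit : List Bool) (i : Nat) (hi : i < visit.length) :
    (visit.take (i+1)).count false
      = (visit.take i).count false + (if visit[i] then 0 else 1) := by
  rw [List.take_succ_eq_append_getElem hi, List.count_append]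
  cases h : visit[i] <;> simp

-- the main bridge: A's backtracking over (depth, visit) equals B's search over the unvisited keywords
theorem mainEq : ∀ (n : Nat) (visit : List Bool), visit.count false ≤ n →
    ∀ (arr : List String), arr.length ≤ visit.length → ∀ (depth : Int) (s : String),
    check depth visit arr s = searchB ((arr.length : Int) - depth) (remainingOf visit arr) s := by
  intro n
  induction n using Nat.strong_induction_on with
  | _ n ihn =>
  intro visit hcnt arr hlen depth s
  rw [check, searchB]
  by_cases hd : depth = (arr.length : Int)
  · simp [hd]
  · have hneed : ¬ ((arr.length : Int) - depth = 0) := by omega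
    simp only [if_neg hd, if_neg hneed]
    have loopEq : ∀ (k i : Nat), i ≤ arr.length → arr.length - i = k →
        checkLoop depth visit arr s i
          = searchLoop ((arr.length : Int) - depth) (remainingOf visit arr) s
              ((visit.take i).count false) := by
      intro k
      induction k with
      | zero =>
        intro i hile hk
        have hi : i = arr.length := by omega
        subst hi
        rw [checkLoop, searchLoop]
        have hR := remLen arr visit hlen
        simp [hR]
      | succ k ihk =>
        intro i hile hk
        have hi : i < arr.length := by omega
        have hiv : i < visit.length := by omega
        have hvd : PySem.List.pyGetD visit (i : Int) true = visit[i] := by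
          rw [PySem.List.pyGetD_natCast]
          exact List.getD_eq_getElem visit true hiv
        rw [checkLoop]
        simp only [dif_pos hi, hvd]
        cases hvi : visit[i] with
        | true =>
          -- visited: A skips; the remaining-list index does not advance
          have hcount : (visit.take (i+1)).count false = (visit.take i).count false := by
            rw [countTakeSucc visit i hiv, hvi]; simp
          simpa [hcount] using ihk (i+1) (by omega) (by omega)
        | false =>
          have hv? : visit[i]? = some false := by
            rw [List.getElem?_eq_getElem hiv, hvi]
          have hRget := remGet i visit arr hi hlen hv?
          set j := (visit.take i).count false with hj
          have hjlt : j < (remainingOf visit arr).length :=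
            (List.getElem?_eq_some_iff.mp hRget).1
          have hRj : (remainingOf visit arr)[j] = arr[i] := by
            have harr : arr[i]! = arr[i] := by
              simp [List.getElem!_eq_getElem?_getD, List.getElem?_eq_getElem hi]
            rw [harr] at hRget
            simpa [List.getElem?_eq_getElem hjlt] using hRget
          have hcount : (visit.take (i+1)).count false = j + 1 := by
            rw [countTakeSucc visit i hiv, hvi, hj]; simp
          rw [searchLoop]
          simp only [dif_pos hjlt, hRj]
          cases hin : PySem.Str.isIn arr[i] s with
          | false =>
            simpa [hin, hcount] using ihk (i+1) (by omega) (by omega)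
          | true =>
            -- the recursive calls agree by the outer (strong) induction hypothesis
            have hset : (visit.set i true).count false < visit.count false :=
              pvCountSetLt visit i hv?
            have hrec := ihn ((visit.set i true).count false) (by omega)
              (visit.set i true) (le_refl _) arr (by simpa using hlen)
              (depth + 1) (pvReplace1 s arr[i])
            have hsub : (arr.length : Int) - (depth + 1) = (arr.length : Int) - depth - 1 := by ring
            rw [hsub, remSet i visit arr hi hlen hv?] at hrec
            rw [hrec]
            cases hc : searchB ((arr.length : Int) - depth - 1)
                ((remainingOf visit arr).take j ++ (remainingOf visit arr).drop (j+1))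
                (pvReplace1 s arr[i]) with
            | true => simp
            | false =>
              simpa [hin, hc, hcount] using ihk (i+1) (by omega) (by omega)
    simpa using loopEq arr.length 0 (by omega) (by omega)

-- ===== VERDICT (by name: the statement is the Claim_ definition above) =====
theorem check_spec : Claim_equal_check := by
  intro depth visit arr sub_str _ hpre
  unfold Spec_check check_alt
  by_cases hd : depth = (arr.length : Int)
  · rw [check, if_pos hd, if_pos hd]
  · rcases hpre with h | hlen
    · exact absurd h hd
    · rw [if_neg hd]
      exact mainEq (visit.count false) visit (le_refl _) arr hlen depth sub_str
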